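-- pv_equiv track=rewrite | github.com/radsilent/TradeWatchPro | ai-processing/services/real_time_disruption_fetcher.py | calculate_prediction_confidence
-- ===== SOURCE A (Python) =====
-- def calculate_prediction_confidence(text: str) -> int:
--     """Calculate confidence level for predictions based on language used"""
--     high_confidence_words = ['will', 'certain', 'definite', 'confirmed', 'official']
--     medium_confidence_words = ['likely', 'expect', 'forecast', 'project']
--     low_confidence_words = ['may', 'could', 'potential', 'possible', 'risk']
--
--     text_lower = text.lower()
--
--     if any(word in text_lower for word in high_confidence_words):
--         return 85
--     elif any(word in text_lower for word in medium_confidence_words):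
--         return 70
--     elif any(word in text_lower for word in low_confidence_words):
--         return 55
--     else:
--         return 40
-- ===== SOURCE B (Python) =====
-- def calculate_prediction_confidence(text: str) -> int:
--     """Calculate confidence level for predictions based on language used"""
--     weights = {
--         'will': 85, 'certain': 85, 'definite': 85, 'confirmed': 85, 'official': 85,
--         'likely': 70, 'expect': 70, 'forecast': 70, 'project': 70,
--         'may': 55, 'could': 55, 'potential': 55, 'possible': 55, 'risk': 55,
--     }
--     text_lower = text.lower()
--     return max((w for kw, w in weights.items() if kw in text_lower), default=40)
-- ===== Notes on version B (the rewrite author's own statement) =====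
-- stated objective: simpler
-- what changed: Replaces the three ordered any() scans with if/elif tiers by one flat keyword->weight table and a single max aggregation with default 40, exact because the tier scores 85>70>55>40 are strictly descending.
import Mathlib
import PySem

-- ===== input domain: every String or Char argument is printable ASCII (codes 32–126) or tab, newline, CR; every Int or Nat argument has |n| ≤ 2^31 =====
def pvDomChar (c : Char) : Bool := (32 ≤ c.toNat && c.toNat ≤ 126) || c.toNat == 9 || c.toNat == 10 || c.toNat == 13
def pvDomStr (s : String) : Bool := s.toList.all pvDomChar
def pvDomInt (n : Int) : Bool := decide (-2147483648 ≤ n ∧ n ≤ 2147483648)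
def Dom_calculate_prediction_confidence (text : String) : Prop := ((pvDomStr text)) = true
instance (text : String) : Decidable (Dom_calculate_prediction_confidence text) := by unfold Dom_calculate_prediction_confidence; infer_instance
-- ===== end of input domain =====

-- B replaces A's three ordered any() tier scans with one flat keyword->weight table and a
-- single max aggregation (default 40); exact because the tier weights 85>70>55>40 descend.


-- ===== PORT A =====
def calculate_prediction_confidence (text : String) : Int :=
  let high_confidence_words := ["will", "certain", "definite", "confirmed", "official"]
  let medium_confidence_words := ["likely", "expect", "forecast", "project"]
  let low_confidence_words := ["may", "could", "potential", "possible", "risk"]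
  let text_lower := PySem.Str.lower text
  if high_confidence_words.any (fun w => PySem.Str.isIn w text_lower) then 85
  else if medium_confidence_words.any (fun w => PySem.Str.isIn w text_lower) then 70
  else if low_confidence_words.any (fun w => PySem.Str.isIn w text_lower) then 55
  else 40

-- ===== PORT B =====
-- the dict literal 'weights' from Source B, as an insertion-order association list
def pvWeights : List (String × Int) :=
  [("will", 85), ("certain", 85), ("definite", 85), ("confirmed", 85), ("official", 85),
   ("likely", 70), ("expect", 70), ("forecast", 70), ("project", 70),
   ("may", 55), ("could", 55), ("potential", 55), ("possible", 55), ("risk", 55)]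

def calculate_prediction_confidence_alt (text : String) : Int :=
  let text_lower := PySem.Str.lower text
  match PySem.List.max?
      ((pvWeights.filter (fun p => PySem.Str.isIn p.1 text_lower)).map Prod.snd)
      (fun w => w) with
  | some m => m
  | none => 40

-- ===== PRECONDITION & SPEC =====
def Spec_calculate_prediction_confidence (text : String) (out : Int) : Prop := out = calculate_prediction_confidence_alt text
instance (text : String) (out : Int) : Decidable (Spec_calculate_prediction_confidence text out) := by unfold Spec_calculate_prediction_confidence; infer_instance

-- ===== CLAIM (what is proved, stated in full; the proofs are below) =====
def Claim_equal_calculate_prediction_confidence : Prop := ∀ (text : String), Dom_calculate_prediction_confidence text → Spec_calculate_prediction_confidence text (calculate_prediction_confidence text)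

-- ===== LEMMAS AND PROOFS =====

-- the filtered-weight list of B, for a generic substring test q
def pvL (q : String → Bool) : List Int :=
  (pvWeights.filter (fun p => q p.1)).map Prod.snd

theorem pvL_mem_inv (q : String → Bool) (m : Int) (hm : m ∈ pvL q) :
    ∃ w, (w, m) ∈ pvWeights ∧ q w = true := by
  simp only [pvL, List.mem_map, List.mem_filter] at hm
  obtain ⟨⟨w, c⟩, ⟨hw, hqw⟩, rfl⟩ := hm
  exact ⟨w, hw, hqw⟩

theorem pvL_mem (q : String → Bool) (w : String) (c : Int)
    (hw : (w, c) ∈ pvWeights) (hq : q w = true) : c ∈ pvL q :=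
  List.mem_map.2 ⟨(w, c), List.mem_filter.2 ⟨hw, hq⟩, rfl⟩

theorem pvWeights_snd (p : String × Int) (hp : p ∈ pvWeights) :
    p.2 = 85 ∨ p.2 = 70 ∨ p.2 = 55 := by
  fin_cases hp <;> simp

-- a keyword carrying weight 85 is a high-tier word, 70 a medium one
theorem pvHigh_of_85 (w : String) (hw : (w, (85 : Int)) ∈ pvWeights) :
    w ∈ (["will", "certain", "definite", "confirmed", "official"] : List String) := by
  simp only [pvWeights, List.mem_cons, List.not_mem_nil, Prod.mk.injEq, or_false] at hw ⊢
  simp at hw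
  tauto
theorem pvLow_of_55 (w : String) (hw : (w, (55 : Int)) ∈ pvWeights) :
    w ∈ (["may", "could", "potential", "possible", "risk"] : List String) := by
  simp only [pvWeights, List.mem_cons, List.not_mem_nil, Prod.mk.injEq, or_false] at hw ⊢
  simp at hw
  tauto
theorem pvMed_of_70 (w : String) (hw : (w, (70 : Int)) ∈ pvWeights) :
    w ∈ (["likely", "expect", "forecast", "project"] : List String) := by
  simp only [pvWeights, List.mem_cons, List.not_mem_nil, Prod.mk.injEq, or_false] at hw ⊢
  simp at hw
  tauto

-- the tiered short-circuit equals the max aggregation, for ANY substring test q,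
-- because the tier weights 85 > 70 > 55 > 40 are strictly descending
theorem pv_key (q : String → Bool) :
    (if (["will", "certain", "definite", "confirmed", "official"] : List String).any q then (85 : Int)
     else if (["likely", "expect", "forecast", "project"] : List String).any q then 70
     else if (["may", "could", "potential", "possible", "risk"] : List String).any q then 55
     else 40)
    = match PySem.List.max? (pvL q) (fun w => w) with
      | some m => m
      | none => 40 := by
  by_cases hH : (["will", "certain", "definite", "confirmed", "official"] : List String).any q = true
  · rw [if_pos hH]
    obtain ⟨w, hwmem, hqw⟩ := List.any_eq_true.1 hH
    have h85 : (85 : Int) ∈ pvL q :=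
      pvL_mem q w 85 (by fin_cases hwmem <;> simp [pvWeights]) hqw
    rcases hmax : PySem.List.max? (pvL q) (fun w => w) with _ | m
    · rw [PySem.List.max?_eq_none_iff] at hmax
      simp [hmax] at h85
    · have hle : (85 : Int) ≤ m := PySem.List.max?_isMax hmax 85 h85
      have hmem := PySem.List.max?_mem hmax
      obtain ⟨w', hw', -⟩ := pvL_mem_inv q m hmem
      have := pvWeights_snd (w', m) hw'
      simp only at this
      show (85 : Int) = m
      omega
  · rw [if_neg hH]
    by_cases hM : (["likely", "expect", "forecast", "project"] : List String).any q = true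
    · rw [if_pos hM]
      obtain ⟨w, hwmem, hqw⟩ := List.any_eq_true.1 hM
      have h70 : (70 : Int) ∈ pvL q :=
        pvL_mem q w 70 (by fin_cases hwmem <;> simp [pvWeights]) hqw
      rcases hmax : PySem.List.max? (pvL q) (fun w => w) with _ | m
      · rw [PySem.List.max?_eq_none_iff] at hmax
        simp [hmax] at h70
      · have hle : (70 : Int) ≤ m := PySem.List.max?_isMax hmax 70 h70
        have hmem := PySem.List.max?_mem hmax
        obtain ⟨w', hw', hqw'⟩ := pvL_mem_inv q m hmem
        have hval := pvWeights_snd (w', m) hw'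
        simp only at hval
        have hnot85 : m ≠ 85 := by
          intro hm
          subst hm
          exact hH (List.any_eq_true.2 ⟨w', pvHigh_of_85 w' hw', hqw'⟩)
        show (70 : Int) = m
        omega
    · rw [if_neg hM]
      by_cases hL : (["may", "could", "potential", "possible", "risk"] : List String).any q = true
      · rw [if_pos hL]
        obtain ⟨w, hwmem, hqw⟩ := List.any_eq_true.1 hL
        have h55 : (55 : Int) ∈ pvL q :=
          pvL_mem q w 55 (by fin_cases hwmem <;> simp [pvWeights]) hqw
        rcases hmax : PySem.List.max? (pvL q) (fun w => w) with _ | m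
        · rw [PySem.List.max?_eq_none_iff] at hmax
          simp [hmax] at h55
        · have hle : (55 : Int) ≤ m := PySem.List.max?_isMax hmax 55 h55
          have hmem := PySem.List.max?_mem hmax
          obtain ⟨w', hw', hqw'⟩ := pvL_mem_inv q m hmem
          have hval := pvWeights_snd (w', m) hw'
          simp only at hval
          have hnot85 : m ≠ 85 := by
            intro hm; subst hm
            exact hH (List.any_eq_true.2 ⟨w', pvHigh_of_85 w' hw', hqw'⟩)
          have hnot70 : m ≠ 70 := by
            intro hm; subst hm
            exact hM (List.any_eq_true.2 ⟨w', pvMed_of_70 w' hw', hqw'⟩)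
          show (55 : Int) = m
          omega
      · rw [if_neg hL]
        have hempty : pvL q = [] := by
          rw [List.eq_nil_iff_forall_not_mem]
          intro m hm
          obtain ⟨w', hw', hqw'⟩ := pvL_mem_inv q m hm
          have := pvWeights_snd (w', m) hw'
          simp only at this
          rcases this with h | h | h <;> subst h
          · exact hH (List.any_eq_true.2 ⟨w', pvHigh_of_85 w' hw', hqw'⟩)
          · exact hM (List.any_eq_true.2 ⟨w', pvMed_of_70 w' hw', hqw'⟩)
          · exact hL (List.any_eq_true.2 ⟨w', pvLow_of_55 w' hw', hqw'⟩)
        rw [hempty]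
        rfl

theorem tiered_eq_max (text : String) :
    calculate_prediction_confidence text = calculate_prediction_confidence_alt text :=
  pv_key (fun w => PySem.Str.isIn w (PySem.Str.lower text))

-- ===== VERDICT (by name: the statement is the Claim_ definition above) =====
theorem calculate_prediction_confidence_spec : Claim_equal_calculate_prediction_confidence := by
  intro text _
  exact tiered_eq_max text
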